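-- pv_equiv track=rewrite | github.com/jeetswadia/CodeSignal | avoidObstacles.py | solution
-- ===== SOURCE A (Python) =====
-- def solution(inputArray):
--
--     for i in range(1,max(inputArray)+1):
--         count = 0
--         for j in range(len(inputArray)):
--             if inputArray[j]%i==0:
--                 break
--             else:
--                 count +=1
--                 if count==len(inputArray):
--                     return i
--
--     return max(inputArray)+1
-- ===== SOURCE B (Python) =====
-- def solution(inputArray):
--     m = max(inputArray)
--     if m < 1 or 0 in inputArray:
--         return m + 1
--     blocked = set()
--     for v in set(inputArray):
--         if v < 0:
--             v = -v
--         d = 1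
--         while d * d <= v:
--             if v % d == 0:
--                 blocked.add(d)
--                 blocked.add(v // d)
--             d += 1
--     for i in range(1, m + 1):
--         if i not in blocked:
--             return i
--     return m + 1
-- ===== Notes on version B (the rewrite author's own statement) =====
-- stated objective: alternative
-- what changed: Instead of trial-dividing every element by each candidate step i (break/count inner loop), B collects all divisors of each distinct |value| once via sqrt enumeration into a set and then scans for the first unmarked step; worst case drops from O(max*n) to O(n*sqrt(max)+max), though on typical inputs A's early exit makes a timing run a wash.
import Mathlib
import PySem

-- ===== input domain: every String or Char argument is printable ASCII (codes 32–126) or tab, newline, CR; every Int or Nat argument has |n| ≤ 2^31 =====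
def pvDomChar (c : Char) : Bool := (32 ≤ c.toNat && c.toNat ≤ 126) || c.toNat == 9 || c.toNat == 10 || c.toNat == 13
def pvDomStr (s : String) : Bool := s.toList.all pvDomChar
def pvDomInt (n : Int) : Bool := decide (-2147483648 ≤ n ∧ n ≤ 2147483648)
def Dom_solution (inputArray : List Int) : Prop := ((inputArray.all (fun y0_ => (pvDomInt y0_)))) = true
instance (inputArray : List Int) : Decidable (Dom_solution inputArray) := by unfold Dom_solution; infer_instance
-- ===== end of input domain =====

-- B replaces A's per-candidate trial division by one sqrt-divisor marking pass per distinct value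
-- plus a scan for the first unmarked step; equivalence of the RETURN value is proved for nonempty input.

-- ===== PORT A =====
-- inner 'for j in range(len(inputArray))' loop: carries 'count', returns some i on 'return i', none on break/exhaustion
def solutionInner (arr : List Int) (i : Int) : List Int → Int → Option Int
  | [], _ => none
  | j :: js, count =>
    match PySem.List.pyGet? arr j with
    | none => none   -- IndexError: unreachable, j ranges over range(len(arr))
    | some v =>
      if PySem.Int.mod v i = 0 then none
      else
        if count + 1 = (arr.length : Int) then some i
        else solutionInner arr i js (count + 1)

-- outer 'for i in range(1, max(inputArray)+1)' loop
def solutionOuter (arr : List Int) (m : Int) : List Int → Int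
  | [] => m + 1
  | i :: is =>
    match solutionInner arr i (PySem.List.pyRange 0 (arr.length : Int) 1) 0 with
    | some r => r
    | none => solutionOuter arr m is

def solution (inputArray : List Int) : Int :=
  match PySem.List.max? inputArray (fun x => x) with
  | none => 0   -- ValueError on max([]): excluded by Pre_solution
  | some m => solutionOuter inputArray m (PySem.List.pyRange 1 (m + 1) 1)

-- ===== PORT B =====
-- 'while d * d <= v: if v % d == 0: blocked.add(d); blocked.add(v // d); d += 1'
def markDivs (v d : Int) (b : PySem.Set Int) : PySem.Set Int :=
  if d * d ≤ v then
    markDivs v (d + 1)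
      (if PySem.Int.mod v d = 0 then
        PySem.Set.add (PySem.Set.add b d) (PySem.Int.floordiv v d)
      else b)
  else b
termination_by (v + 1 - d).toNat
decreasing_by
  have h1 : 2 * d - 1 ≤ v := by nlinarith [mul_self_nonneg (d - 1)]
  have h2 : 0 ≤ v := by nlinarith [mul_self_nonneg d]
  omega

-- 'for i in range(1, m + 1): if i not in blocked: return i' then 'return m + 1'
def solutionAltScan (blocked : PySem.Set Int) (m : Int) : List Int → Int
  | [] => m + 1
  | i :: is => if i ∉ blocked then i else solutionAltScan blocked m is

def solution_alt (inputArray : List Int) : Int :=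
  match PySem.List.max? inputArray (fun x => x) with
  | none => 0   -- ValueError on max([]): excluded by Pre_solution
  | some m =>
    if m < 1 ∨ 0 ∈ inputArray then m + 1
    else
      let blocked := (PySem.Set.ofList inputArray).foldl
        (fun b v => markDivs (if v < 0 then -v else v) 1 b) PySem.Set.empty
      solutionAltScan blocked m (PySem.List.pyRange 1 (m + 1) 1)

-- ===== PRECONDITION & SPEC =====
-- Pre_ excludes only the empty list, on which A's max(inputArray) raises ValueError.
def Pre_solution (inputArray : List Int) : Prop := inputArray ≠ []
instance (inputArray : List Int) : Decidable (Pre_solution inputArray) := by unfold Pre_solution; infer_instance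
def pvWitness_solution : List Int := ([2, 3])

def Spec_solution (inputArray : List Int) (out : Int) : Prop := out = solution_alt inputArray
instance (inputArray : List Int) (out : Int) : Decidable (Spec_solution inputArray out) := by unfold Spec_solution; infer_instance

-- ===== CLAIM (what is proved, stated in full; the proofs are below) =====
def Claim_equal_solution : Prop := ∀ (inputArray : List Int), Dom_solution inputArray → Pre_solution inputArray → Spec_solution inputArray (solution inputArray)

-- ===== LEMMAS AND PROOFS =====

-- A's inner loop, started at index j with count = j, returns some i iff no remaining element is divisible by i
theorem solutionInner_eq (arr : List Int) (i : Int) :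
    ∀ fuel j : Nat, arr.length - j = fuel → j < arr.length →
    solutionInner arr i (PySem.List.pyRange (j : Int) (arr.length : Int) 1) (j : Int) =
      (if ∀ v ∈ arr.drop j, ¬ i ∣ v then some i else none) := by
  intro fuel
  induction fuel with
  | zero => intro j hfj hj; omega
  | succ n ih =>
    intro j hfj hj
    rw [PySem.List.pyRange_one_cons (by exact_mod_cast hj)]
    have hget : PySem.List.pyGet? arr (j : Int) = some arr[j] := by
      simp [PySem.List.pyGet?_natCast, List.getElem?_eq_getElem hj]
    rw [solutionInner, hget]
    dsimp only
    have hdrop : arr.drop j = arr[j] :: arr.drop (j + 1) := List.drop_eq_getElem_cons hj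
    by_cases hdvd : PySem.Int.mod arr[j] i = 0
    · rw [if_pos hdvd]
      have : ¬ (∀ v ∈ arr.drop j, ¬ i ∣ v) := by
        intro hall
        exact hall arr[j] (by rw [hdrop]; exact List.mem_cons_self) ((PySem.Int.mod_eq_zero_iff_dvd _ _).mp hdvd)
      rw [if_neg this]
    · rw [if_neg hdvd]
      have hjdvd : ¬ i ∣ arr[j] := fun h => hdvd ((PySem.Int.mod_eq_zero_iff_dvd _ _).mpr h)
      by_cases hlast : j + 1 = arr.length
      · have hc : (j : Int) + 1 = (arr.length : Int) := by exact_mod_cast congrArg (Nat.cast (R := Int)) hlast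
        rw [if_pos hc]
        have : arr.drop (j + 1) = [] := List.drop_eq_nil_of_le (by omega)
        rw [hdrop, this]
        simp [hjdvd]
      · have hc : ¬ ((j : Int) + 1 = (arr.length : Int)) := by
          intro h; exact hlast (by exact_mod_cast h)
        rw [if_neg hc]
        have hj1 : j + 1 < arr.length := by omega
        have hcast : (j : Int) + 1 = ((j + 1 : Nat) : Int) := by push_cast; ring
        rw [hcast, ih (j + 1) (by omega) hj1, hdrop]
        simp only [List.forall_mem_cons]
        simp [hjdvd]


-- membership in the sqrt-divisor marking loop
theorem mem_markDivs (v : Int) :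
    ∀ fuel (d : Int) (b : PySem.Set Int) (x : Int), (v + 1 - d).toNat = fuel → 1 ≤ d →
    (x ∈ markDivs v d b ↔
      x ∈ b ∨ ∃ e, d ≤ e ∧ e * e ≤ v ∧ PySem.Int.mod v e = 0 ∧ (x = e ∨ x = PySem.Int.floordiv v e)) := by
  intro fuel
  induction fuel with
  | zero =>
    intro d b x hf hd
    have hvd : v + 1 - d ≤ 0 := by omega
    have hdd : ¬ d * d ≤ v := by intro h; nlinarith
    rw [markDivs, if_neg hdd]
    constructor
    · exact Or.inl
    · rintro (h | ⟨e, he, hee, -⟩)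
      · exact h
      · exact absurd hee (by nlinarith)
  | succ n ih =>
    intro d b x hf hd
    by_cases hle : d * d ≤ v
    · have hdv : d ≤ v := by nlinarith
      rw [markDivs, if_pos hle,
        ih (d + 1) _ x (by omega) (by omega)]
      have hsplit : ∀ (Q : Int → Prop), (∃ e, d ≤ e ∧ Q e) ↔ Q d ∨ (∃ e, d + 1 ≤ e ∧ Q e) := by
        intro Q
        constructor
        · rintro ⟨e, he, hq⟩
          rcases eq_or_lt_of_le he with rfl | h
          · exact Or.inl hq
          · exact Or.inr ⟨e, by omega, hq⟩
        · rintro (h | ⟨e, he, hq⟩)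
          · exact ⟨d, le_refl _, h⟩
          · exact ⟨e, by omega, hq⟩
      rw [hsplit (fun e => e * e ≤ v ∧ PySem.Int.mod v e = 0 ∧ (x = e ∨ x = PySem.Int.floordiv v e))]
      by_cases hmod : PySem.Int.mod v d = 0
      · rw [if_pos hmod]
        simp only [PySem.Set.mem_add]
        constructor
        · rintro (((h | h) | h) | h)
          · exact Or.inl h
          · exact Or.inr (Or.inl ⟨hle, hmod, Or.inl h⟩)
          · exact Or.inr (Or.inl ⟨hle, hmod, Or.inr h⟩)
          · exact Or.inr (Or.inr h)
        · rintro (h | (⟨-, -, (h | h)⟩ | h))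
          · exact Or.inl (Or.inl (Or.inl h))
          · exact Or.inl (Or.inl (Or.inr h))
          · exact Or.inl (Or.inr h)
          · exact Or.inr h
      · rw [if_neg hmod]
        constructor
        · rintro (h | h)
          · exact Or.inl h
          · exact Or.inr (Or.inr h)
        · rintro (h | (⟨-, hm, -⟩ | h))
          · exact Or.inl h
          · exact absurd hm hmod
          · exact Or.inr h
    · rw [markDivs, if_neg hle]
      constructor
      · exact Or.inl
      · rintro (h | ⟨e, he, hee, -⟩)
        · exact h
        · exact absurd hee (by nlinarith [mul_le_mul he he (by omega : (0:Int) ≤ d) (by omega : (0:Int) ≤ e)])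

theorem mem_markDivs_one (v : Int) (hv : 1 ≤ v) (b : PySem.Set Int) (x : Int) :
    x ∈ markDivs v 1 b ↔ x ∈ b ∨ (1 ≤ x ∧ x ∣ v) := by
  rw [mem_markDivs v ((v + 1 - 1).toNat) 1 b x rfl le_rfl]
  apply or_congr_right
  constructor
  · rintro ⟨e, he1, hee, hmod, hx⟩
    have hdvd : e ∣ v := (PySem.Int.mod_eq_zero_iff_dvd v e).mp hmod
    obtain ⟨c, hc⟩ := hdvd
    have hc1 : 1 ≤ c := by nlinarith
    rcases hx with rfl | rfl
    · exact ⟨he1, ⟨c, hc⟩⟩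
    · rw [PySem.Int.floordiv_eq_ediv_of_pos (by omega), hc,
        Int.mul_ediv_cancel_left c (by omega : e ≠ 0)]
      exact ⟨hc1, ⟨e, mul_comm e c⟩⟩
  · rintro ⟨hx1, c, hc⟩
    have hc1 : 1 ≤ c := by nlinarith
    by_cases hxx : x * x ≤ v
    · exact ⟨x, hx1, hxx, (PySem.Int.mod_eq_zero_iff_dvd v x).mpr ⟨c, hc⟩, Or.inl rfl⟩
    · have hcx : c < x := by nlinarith
      refine ⟨c, hc1, by nlinarith, (PySem.Int.mod_eq_zero_iff_dvd v c).mpr ⟨x, by linear_combination hc⟩, Or.inr ?_⟩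
      rw [PySem.Int.floordiv_eq_ediv_of_pos (by omega), hc, mul_comm,
        Int.mul_ediv_cancel_left x (by omega : c ≠ 0)]

theorem mem_blocked (l : List Int) (hl : ∀ v ∈ l, v ≠ 0) (b : PySem.Set Int) (x : Int) :
    x ∈ l.foldl (fun b v => markDivs (if v < 0 then -v else v) 1 b) b ↔
      x ∈ b ∨ (1 ≤ x ∧ ∃ v ∈ l, x ∣ v) := by
  induction l generalizing b with
  | nil => simp
  | cons v l ih =>
    have hv0 : v ≠ 0 := hl v List.mem_cons_self
    have h1 : (1 : Int) ≤ (if v < 0 then -v else v) := by split <;> omega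
    have hdvd : x ∣ (if v < 0 then -v else v) ↔ x ∣ v := by split <;> simp [dvd_neg]
    rw [List.foldl_cons, ih (fun w hw => hl w (List.mem_cons_of_mem _ hw)),
      mem_markDivs_one _ h1 b x, hdvd, List.exists_mem_cons_iff]
    tauto

theorem solutionInner_zero (arr : List Int) (i : Int) (h : arr ≠ []) :
    solutionInner arr i (PySem.List.pyRange 0 (arr.length : Int) 1) 0 =
      if ∀ v ∈ arr, ¬ i ∣ v then some i else none := by
  have hlen : 0 < arr.length := List.length_pos_iff.mpr h
  simpa using solutionInner_eq arr i (arr.length - 0) 0 rfl hlen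

-- both scans return the same first element when the blocked set matches divisibility
theorem scan_agree (arr : List Int) (harr : arr ≠ []) (blocked : PySem.Set Int) (m : Int) :
    ∀ L : List Int, (∀ i ∈ L, (i ∈ blocked ↔ ∃ v ∈ arr, i ∣ v)) →
    solutionOuter arr m L = solutionAltScan blocked m L := by
  intro L hL
  induction L with
  | nil => rfl
  | cons i L ih =>
    simp only [solutionOuter, solutionAltScan]
    by_cases hb : i ∈ blocked
    · obtain ⟨v, hv, hdvd⟩ := (hL i List.mem_cons_self).mp hb
      have hno : ¬ ∀ w ∈ arr, ¬ i ∣ w := fun hall => hall v hv hdvd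
      rw [solutionInner_zero arr i harr, if_neg hno, if_neg (by simpa using hb)]
      exact ih (fun j hj => hL j (List.mem_cons_of_mem _ hj))
    · have hall : ∀ w ∈ arr, ¬ i ∣ w := fun w hw hd => hb ((hL i List.mem_cons_self).mpr ⟨w, hw, hd⟩)
      rw [solutionInner_zero arr i harr, if_pos hall, if_pos (by simpa using hb)]

theorem outer_of_zero_mem (arr : List Int) (harr : arr ≠ []) (hz : (0 : Int) ∈ arr) (m : Int) :
    ∀ L : List Int, solutionOuter arr m L = m + 1 := by
  intro L
  induction L with
  | nil => rfl
  | cons i L ih =>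
    simp only [solutionOuter]
    rw [solutionInner_zero arr i harr, if_neg (fun hall => hall 0 hz (dvd_zero i))]
    exact ih

-- ===== VERDICT (by name: the statement is the Claim_ definition above) =====
theorem solution_spec : Claim_equal_solution := by
  intro arr hdom hpre
  unfold Spec_solution solution solution_alt
  cases hmax : PySem.List.max? arr (fun x => x) with
  | none => rfl
  | some m =>
    dsimp only
    by_cases hz : m < 1 ∨ (0 : Int) ∈ arr
    · rw [if_pos hz]
      rcases hz with hm | hz
      · rw [PySem.List.pyRange_one_eq_nil (by omega)]
        rfl
      · exact outer_of_zero_mem arr hpre hz m _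
    · rw [if_neg hz]
      push Not at hz
      apply scan_agree arr hpre
      intro i hi
      have hi1 : 1 ≤ i := ((PySem.List.mem_pyRange_one).mp hi).1
      rw [mem_blocked (PySem.Set.ofList arr)
        (fun v hv h0 => hz.2 (h0 ▸ (PySem.Set.mem_ofList _ _).mp hv)) PySem.Set.empty i]
      simp only [PySem.Set.mem_ofList _ _]
      constructor
      · rintro (h | ⟨-, hv⟩)
        · simp [PySem.Set.empty] at h
        · exact hv
      · intro hv
        exact Or.inr ⟨hi1, hv⟩
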